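-- pv_equiv track=rewrite | github.com/tkwa/nonsurrounding-polyomino | drake_polyomino.py | str_to_cells
-- ===== SOURCE A (Python) =====
-- def str_to_cells(q):
--     q=q.split('\n')
--     cells=[]
--     for i in range(len(q)):
--         for j in range(len(q[i])):
--             if q[i][j]=='1':
--                 cells.append([j,-i])
--     return cells
-- ===== SOURCE B (Python) =====
-- def str_to_cells(q):
--     # Single left-to-right pass over the raw string: no split, no indexing.
--     # Track (row, col); '\n' advances the row and resets the column.
--     cells = []
--     row = 0
--     col = 0
--     for ch in q:
--         if ch == '\n':
--             row += 1
--             col = 0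
--         else:
--             if ch == '1':
--                 cells.append([col, -row])
--             col += 1
--     return cells
-- ===== Notes on version B (the rewrite author's own statement) =====
-- stated objective: alternative
-- what changed: Replaced split-into-lines plus nested index loops (range/len with subscripted lookups) by one direct pass over the raw characters that maintains a (row,col) cursor and resets it at each newline, never materialising the line list.
import Mathlib
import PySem

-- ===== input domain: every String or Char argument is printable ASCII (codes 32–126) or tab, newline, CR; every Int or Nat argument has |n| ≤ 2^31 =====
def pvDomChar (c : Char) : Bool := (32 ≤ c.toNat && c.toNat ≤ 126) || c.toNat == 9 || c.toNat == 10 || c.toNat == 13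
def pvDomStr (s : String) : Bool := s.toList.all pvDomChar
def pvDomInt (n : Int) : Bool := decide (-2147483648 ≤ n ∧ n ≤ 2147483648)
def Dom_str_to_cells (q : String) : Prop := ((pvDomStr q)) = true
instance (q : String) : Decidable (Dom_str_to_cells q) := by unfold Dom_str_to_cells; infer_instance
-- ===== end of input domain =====

-- B replaces A's split-into-lines + nested index loops by one pass over the raw
-- characters with a (row, col) cursor reset at each newline (objective: alternative).

-- ===== PORT A =====
-- inner loop: 'for j in range(len(q[i])): if q[i][j]=="1": cells.append([j,-i])'
def strToCellsInnerA (line : List Char) (i : Int) (cells : List (List Int)) : List (List Int) :=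
  (PySem.List.pyRange 0 (line.length : Int) 1).foldl
    (fun acc j => if PySem.List.pyGetD line j ' ' = '1' then acc ++ [[j, -i]] else acc) cells

def str_to_cells (q : String) : List (List Int) :=
  let lines := PySem.Chars.splitOn q.toList ['\n']   -- q = q.split('\n'); sep nonempty, exact
  (PySem.List.pyRange 0 (lines.length : Int) 1).foldl
    (fun cells i => strToCellsInnerA (PySem.List.pyGetD lines i []) i cells) []

-- ===== PORT B =====
-- 'for ch in q', tracking row/col, '\n' resets col and bumps row
def strToCellsGoB : List Char → Int → Int → List (List Int) → List (List Int)
  | [], _, _, cells => cells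
  | ch :: rest, row, col, cells =>
    if ch = '\n' then strToCellsGoB rest (row + 1) 0 cells
    else strToCellsGoB rest row (col + 1)
      (if ch = '1' then cells ++ [[col, -row]] else cells)

def str_to_cells_alt (q : String) : List (List Int) :=
  strToCellsGoB q.toList 0 0 []

-- ===== PRECONDITION & SPEC =====
def Spec_str_to_cells (q : String) (out : List (List Int)) : Prop := out = str_to_cells_alt q
instance (q : String) (out : List (List Int)) : Decidable (Spec_str_to_cells q out) := by unfold Spec_str_to_cells; infer_instance

-- ===== CLAIM (what is proved, stated in full; the proofs are below) =====
def Claim_equal_str_to_cells : Prop := ∀ (q : String), Dom_str_to_cells q → Spec_str_to_cells q (str_to_cells q)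

-- ===== LEMMAS AND PROOFS =====

-- simple structural split on a single character
def split1 (c : Char) : List Char → List (List Char)
  | [] => [[]]
  | x :: xs =>
    if x = c then [] :: split1 c xs
    else
      match split1 c xs with
      | r :: rs => (x :: r) :: rs
      | [] => [[x]]

theorem split1_ne_nil (c : Char) (l : List Char) : split1 c l ≠ [] := by
  cases l with
  | nil => simp [split1]
  | cons x xs =>
    simp only [split1]
    split
    · simp
    · split <;> simp_all

def consHead (p : List Char) : List (List Char) → List (List Char)
  | r :: rs => (p ++ r) :: rs
  | [] => [p]

theorem go_single (c : Char) : ∀ (fuel : Nat) (l cur : List Char) (acc : List (List Char)),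
    l.length < fuel →
    PySem.Chars.splitOn.go [c] fuel l cur acc = acc.reverse ++ consHead cur.reverse (split1 c l) := by
  intro fuel
  induction fuel with
  | zero => intro l cur acc h; omega
  | succ fuel ih =>
    intro l cur acc h
    cases l with
    | nil =>
      simp [PySem.Chars.splitOn.go, split1, consHead]
    | cons x rest =>
      rw [PySem.Chars.splitOn.go]
      by_cases hx : x = c
      · subst hx
        simp only [List.isPrefixOf, BEq.rfl, Bool.true_and, if_true,
          List.length_cons, List.length_nil, List.drop_succ_cons, List.drop_zero]
        rw [ih rest [] (cur.reverse :: acc) (by simpa using Nat.lt_of_succ_lt_succ h)]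
        rcases hsp : split1 x rest with _ | ⟨r, rs⟩
        · exact absurd hsp (split1_ne_nil x rest)
        · simp [split1, consHead, hsp]
      · have hpre : ([c].isPrefixOf (x :: rest)) = false := by
          simp [List.isPrefixOf]; exact fun hc => absurd hc.symm hx
        simp only [hpre, Bool.false_eq_true, if_false]
        rw [ih rest (x :: cur) acc (by simpa using Nat.lt_of_succ_lt_succ h)]
        rcases hsp : split1 c rest with _ | ⟨r, rs⟩
        · exact absurd hsp (split1_ne_nil c rest)
        · simp [split1, consHead, hsp, hx]

theorem splitOn_single (c : Char) (l : List Char) :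
    PySem.Chars.splitOn l [c] = split1 c l := by
  rw [PySem.Chars.splitOn, go_single c (l.length + 1) l [] [] (Nat.lt_succ_self _)]
  rcases hsp : split1 c l with _ | ⟨r, rs⟩
  · exact absurd hsp (split1_ne_nil c l)
  · simp [consHead]

-- cells produced by one line scanned at row i starting at column c
def rowScan (i : Int) : List Char → Int → List (List Int)
  | [], _ => []
  | x :: xs, c => (if x = '1' then [[c, -i]] else []) ++ rowScan i xs (c + 1)

-- cells produced by a list of lines, first scanned from column c0, rows i, i+1, …
def linesCells : List (List Char) → Int → Int → List (List Int)
  | [], _, _ => []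
  | ln :: rest, i, c0 => rowScan i ln c0 ++ linesCells rest (i + 1) 0

theorem innerA_eq (line : List Char) (i : Int) :
    ∀ (s : Int) (cells : List (List Int)),
    (PySem.List.enumerate line s).foldl
      (fun acc p => if p.2 = '1' then acc ++ [[p.1, -i]] else acc) cells
      = cells ++ rowScan i line s := by
  induction line with
  | nil => intro s cells; simp [PySem.List.enumerate_nil, rowScan]
  | cons x xs ih =>
    intro s cells
    rw [PySem.List.enumerate_cons, List.foldl_cons, ih]
    by_cases hx : x = '1' <;> simp [rowScan, hx]

theorem innerA_spec (line : List Char) (i : Int) (cells : List (List Int)) :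
    strToCellsInnerA line i cells = cells ++ rowScan i line 0 := by
  unfold strToCellsInnerA
  have he := PySem.List.enumerate_eq_map_pyRange (xs := line) (d := ' ')
  rw [← innerA_eq line i 0 cells, he, List.foldl_map]
  simp [PySem.List.len]

theorem outerA_eq (lines : List (List Char)) :
    ∀ (s : Int) (cells : List (List Int)),
    (PySem.List.enumerate lines s).foldl
      (fun acc p => strToCellsInnerA p.2 p.1 acc) cells
      = cells ++ linesCells lines s 0 := by
  induction lines with
  | nil => intro s cells; simp [PySem.List.enumerate_nil, linesCells]
  | cons ln rest ih =>
    intro s cells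
    rw [PySem.List.enumerate_cons, List.foldl_cons, ih, innerA_spec, linesCells,
      List.append_assoc]

theorem goB_eq (l : List Char) :
    ∀ (row col : Int) (cells : List (List Int)),
    strToCellsGoB l row col cells = cells ++ linesCells (split1 '\n' l) row col := by
  induction l with
  | nil => intro row col cells; simp [strToCellsGoB, split1, linesCells, rowScan]
  | cons x xs ih =>
    intro row col cells
    by_cases hn : x = '\n'
    · subst hn
      rw [strToCellsGoB, if_pos rfl, ih]
      simp [split1, linesCells, rowScan]
    · rw [strToCellsGoB, if_neg hn, ih]
      rcases hsp : split1 '\n' xs with _ | ⟨r, rs⟩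
      · exact absurd hsp (split1_ne_nil '\n' xs)
      · by_cases hx : x = '1' <;>
          simp [split1, hn, hsp, linesCells, rowScan, hx, List.append_assoc]

-- ===== VERDICT (by name: the statement is the Claim_ definition above) =====
theorem str_to_cells_spec : Claim_equal_str_to_cells := by
  intro q _
  unfold Spec_str_to_cells str_to_cells str_to_cells_alt
  rw [goB_eq, splitOn_single]
  have he := PySem.List.enumerate_eq_map_pyRange (xs := split1 '\n' q.toList) (d := ([] : List Char))
  rw [← outerA_eq (split1 '\n' q.toList) 0 [], he, List.foldl_map]
  simp [PySem.List.len]
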